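-- pv_equiv track=rewrite | github.com/sueszli/vector-database-benchmark | dataset/python-mutated/stress_aes.py | aes_r_con
-- ===== SOURCE A (Python) =====
-- def aes_r_con(a):
--     if False:
--         while True:
--             i = 10
--     ans = 1
--     while a > 1:
--         ans <<= 1
--         if ans & 256:
--             ans ^= 283
--         a -= 1
--     return ans
-- ===== SOURCE B (Python) =====
-- def _gmul(x, y):
--     """Carryless multiply in GF(2^8), reducing with 0x11B."""
--     r = 0
--     while y > 0:
--         if y % 2:
--             r ^= x
--         x <<= 1
--         if x & 0x100:
--             x ^= 0x11B
--         y //= 2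
--     return r
--
--
-- def aes_r_con(a):
--     e = a - 1 if a > 1 else 0
--     result, base = 1, 2
--     while e > 0:
--         if e % 2:
--             result = _gmul(result, base)
--         base = _gmul(base, base)
--         e //= 2
--     return result
-- ===== Notes on version B (the rewrite author's own statement) =====
-- stated objective: faster
-- what changed: Replaces the one-doubling-per-decrement loop (a-1 iterations) with exponentiation-by-squaring over the bits of the exponent using a carryless GF(2^8) multiply reducing with 0x11B.
import Mathlib
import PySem

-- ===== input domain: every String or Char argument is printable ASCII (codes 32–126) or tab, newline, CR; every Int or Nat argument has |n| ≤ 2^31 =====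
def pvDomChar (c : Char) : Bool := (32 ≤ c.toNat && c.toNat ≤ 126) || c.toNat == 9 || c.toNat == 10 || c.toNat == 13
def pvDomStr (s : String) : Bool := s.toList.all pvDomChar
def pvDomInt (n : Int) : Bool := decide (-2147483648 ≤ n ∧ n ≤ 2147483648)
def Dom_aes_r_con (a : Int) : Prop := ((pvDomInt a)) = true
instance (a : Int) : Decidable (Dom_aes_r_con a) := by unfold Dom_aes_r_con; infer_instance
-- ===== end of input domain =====

-- B replaces A's (a-1)-step doubling loop with exponentiation-by-squaring in GF(2^8) (objective: faster, O(log a) multiplies).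

-- ===== PORT A =====
-- while a > 1: ans <<= 1; if ans & 256: ans ^= 283; a -= 1
def aesLoopA (ans a : Int) : Int :=
  if a > 1 then
    let ans := Int.shiftLeft ans 1
    let ans := if Int.land ans 256 ≠ 0 then Int.xor ans 283 else ans
    aesLoopA ans (a - 1)
  else ans
termination_by a.toNat
decreasing_by omega

def aes_r_con (a : Int) : Int := aesLoopA 1 a

-- ===== PORT B =====
-- _gmul: r = 0; while y > 0: if y % 2: r ^= x; x <<= 1; if x & 0x100: x ^= 0x11B; y //= 2
-- fuel = y.toNat only makes the while-loop total; the loop test y > 0 is Python's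
def gmulLoop (r x y : Int) : Nat → Int
  | 0 => r
  | fuel + 1 =>
    if y > 0 then
      let r : Int := if PySem.Int.mod y 2 ≠ 0 then Int.xor r x else r
      let x := Int.shiftLeft x 1
      let x := if Int.land x 256 ≠ 0 then Int.xor x 283 else x
      gmulLoop r x (PySem.Int.floordiv y 2) fuel
    else r

def gmul (x y : Int) : Int := gmulLoop 0 x y y.toNat

-- square-and-multiply loop of B
def powLoop (result base e : Int) : Int :=
  if e > 0 then
    let result := if PySem.Int.mod e 2 ≠ 0 then gmul result base else result
    powLoop result (gmul base base) (PySem.Int.floordiv e 2)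
  else result
termination_by e.toNat
decreasing_by
  have h : PySem.Int.floordiv e 2 = e / 2 := PySem.Int.floordiv_eq_ediv_of_pos (by omega)
  rw [h]; omega

def aes_r_con_alt (a : Int) : Int :=
  let e := if a > 1 then a - 1 else 0
  powLoop 1 2 e

-- ===== PRECONDITION & SPEC =====
def Spec_aes_r_con (a : Int) (out : Int) : Prop := out = aes_r_con_alt a
instance (a : Int) (out : Int) : Decidable (Spec_aes_r_con a out) := by unfold Spec_aes_r_con; infer_instance

-- ===== CLAIM (what is proved, stated in full; the proofs are below) =====
def Claim_equal_aes_r_con : Prop := ∀ (a : Int), Dom_aes_r_con a → Spec_aes_r_con a (aes_r_con a)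

-- ===== LEMMAS AND PROOFS =====

-- one GF(2^8) doubling step, as A's loop body performs it
def gstep (ans : Int) : Int :=
  let ans := Int.shiftLeft ans 1
  if Int.land ans 256 ≠ 0 then Int.xor ans 283 else ans

-- P n = 2^n in GF(2^8)
def P (n : Nat) : Int := gstep^[n] 1

lemma P_succ (n : Nat) : P (n + 1) = gstep (P n) := Function.iterate_succ_apply' gstep n 1

lemma aesLoopA_eq_P_iter (ans a : Int) : aesLoopA ans a = gstep^[(a - 1).toNat] ans := by
  fun_induction aesLoopA ans a with
  | case1 ans a h x1 x2 ih =>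
      have h1 : (a - 1).toNat = (a - 1 - 1).toNat + 1 := by omega
      rw [h1, Function.iterate_succ_apply]
      exact ih
  | case2 ans a h =>
      have h0 : (a - 1).toNat = 0 := by omega
      simp [h0]

set_option maxRecDepth 40000 in
lemma P_add_51 (n : Nat) : P (n + 51) = P n := by
  induction n with
  | zero => decide
  | succ n ih =>
      have h : n + 1 + 51 = (n + 51) + 1 := by omega
      rw [h, P_succ, ih, ← P_succ]

lemma P_mod (n : Nat) : P (n % 51) = P n := by
  induction n using Nat.strong_induction_on with
  | _ n ih =>
    by_cases h : n < 51
    · rw [Nat.mod_eq_of_lt h]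
    · have h2 : n = (n - 51) + 51 := by omega
      rw [h2, P_add_51, ← ih (n - 51) (by omega)]
      congr 1
      omega

lemma gmul_P_small : ∀ i < 51, ∀ j < 51, gmul (P i) (P j) = P ((i + j) % 51) := by decide

lemma gmul_P (i j : Nat) : gmul (P i) (P j) = P (i + j) := by
  rw [← P_mod i, ← P_mod j,
    gmul_P_small _ (Nat.mod_lt _ (by omega)) _ (Nat.mod_lt _ (by omega)),
    ← Nat.add_mod, P_mod]

lemma powLoop_P (n : Nat) : ∀ (e : Int), e.toNat = n → ∀ i j : Nat,
    powLoop (P i) (P j) e = P (i + j * n) := by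
  induction n using Nat.strong_induction_on with
  | _ n ih =>
    intro e he i j
    unfold powLoop
    by_cases hpos : e > 0
    · have hn : 0 < n := by omega
      have heq : e = (n : Int) := by omega
      subst heq
      have hm : PySem.Int.mod (n : Int) 2 = ((n % 2 : Nat) : Int) := by
        exact_mod_cast PySem.Int.mod_natCast n 2
      have hd : PySem.Int.floordiv (n : Int) 2 = ((n / 2 : Nat) : Int) := by
        exact_mod_cast PySem.Int.floordiv_natCast n 2
      have hlt : n / 2 < n := by omega
      rcases Nat.mod_two_eq_zero_or_one n with h2 | h2
      · rw [if_pos hpos, hm, h2, hd]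
        simp only [Nat.cast_zero, ne_eq, not_true_eq_false, if_false, gmul_P]
        rw [ih (n / 2) hlt _ (Int.toNat_natCast _) i (j + j)]
        have harg : i + (j + j) * (n / 2) = i + j * n := by
          conv_rhs => rw [show n = 2 * (n / 2) by omega]
          ring
        rw [harg]
      · rw [if_pos hpos, hm, h2, hd]
        simp only [Nat.cast_one, ne_eq, one_ne_zero, not_false_eq_true, if_true, gmul_P]
        rw [ih (n / 2) hlt _ (Int.toNat_natCast _) (i + j) (j + j)]
        have harg : i + j + (j + j) * (n / 2) = i + j * n := by
          conv_rhs => rw [show n = 2 * (n / 2) + 1 by omega]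
          ring
        rw [harg]
    · rw [if_neg hpos]
      have h0 : n = 0 := by omega
      rw [h0]
      simp

-- ===== VERDICT (by name: the statement is the Claim_ definition above) =====
theorem aes_r_con_spec : Claim_equal_aes_r_con := by
  intro a _
  unfold Spec_aes_r_con aes_r_con aes_r_con_alt
  rw [aesLoopA_eq_P_iter]
  show P ((a - 1).toNat) = _
  have hP0 : (1 : Int) = P 0 := rfl
  have hP1 : (2 : Int) = P 1 := by decide
  rw [hP0, hP1, powLoop_P _ _ rfl 0 1]
  congr 1
  by_cases h : a > 1 <;> simp [h] <;> omega
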